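-- pv_equiv track=rewrite | github.com/dwclark/python-advent-of-code-2020 | day17.py | game_limits
-- ===== SOURCE A (Python) =====
-- def game_limits(dims, cubes):
--     mins, maxes = {}, {}
--     for cube in cubes.keys():
--         for i, d in enumerate(cube):
--             current_min = mins.get(i, None)
--             if current_min is None or d-1 < current_min:
--                 mins[i] = d-1
--
--             current_max = maxes.get(i, None)
--             if current_max is None or current_max < d+1:
--                 maxes[i] = d+1
--
--     return [(mins[i], maxes[i]) for i in range(dims)]
-- ===== SOURCE B (Python) =====
-- def game_limits(dims, cubes):
--     cols = {}
--     for cube in cubes.keys():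
--         for i, d in enumerate(cube):
--             cols.setdefault(i, []).append(d)
--     return [(min(cols[i]) - 1, max(cols[i]) + 1) for i in range(dims)]
-- ===== Notes on version B (the rewrite author's own statement) =====
-- stated objective: alternative
-- what changed: B first gathers each dimension's coordinates into per-index column lists, then reduces each column once with library min/max, instead of A's fused loop that maintains running min/max dictionaries with conditional updates.
import Mathlib
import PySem

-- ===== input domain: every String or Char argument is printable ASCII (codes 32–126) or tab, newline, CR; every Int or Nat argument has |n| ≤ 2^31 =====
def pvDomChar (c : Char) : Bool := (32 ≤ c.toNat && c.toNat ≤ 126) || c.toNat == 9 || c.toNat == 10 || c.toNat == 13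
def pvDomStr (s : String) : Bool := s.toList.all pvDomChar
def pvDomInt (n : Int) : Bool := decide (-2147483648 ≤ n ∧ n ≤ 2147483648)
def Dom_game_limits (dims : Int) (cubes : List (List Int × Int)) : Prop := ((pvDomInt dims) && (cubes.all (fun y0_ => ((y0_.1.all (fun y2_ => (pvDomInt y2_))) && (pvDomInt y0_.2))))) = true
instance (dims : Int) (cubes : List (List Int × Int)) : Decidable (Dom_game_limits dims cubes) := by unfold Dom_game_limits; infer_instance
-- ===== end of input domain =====

-- B gathers per-dimension column lists first and reduces each with min/max once,
-- instead of A's fused loop keeping running min/max dictionaries (objective: alternative).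

-- ===== PORT A =====
-- loop body of A: update the running-min and running-max dicts with coordinate d at index i
def glStepA (st : PySem.Dict Int Int × PySem.Dict Int Int) (p : Int × Int) :
    PySem.Dict Int Int × PySem.Dict Int Int :=
  let i := p.1
  let d := p.2
  let mins :=
    match st.1.get? i with
    | none => st.1.insert i (d - 1)
    | some current_min => if d - 1 < current_min then st.1.insert i (d - 1) else st.1
  let maxes :=
    match st.2.get? i with
    | none => st.2.insert i (d + 1)
    | some current_max => if current_max < d + 1 then st.2.insert i (d + 1) else st.2
  (mins, maxes)

def game_limits (dims : Int) (cubes : List (List Int × Int)) : List (Int × Int) :=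
  let st := cubes.foldl
    (fun st cube => (PySem.List.enumerate cube.1).foldl glStepA st)
    (PySem.Dict.empty, PySem.Dict.empty)
  (PySem.List.pyRange 0 dims 1).map (fun i =>
    ((st.1.get? i).getD 0, (st.2.get? i).getD 0))   -- mins[i]/maxes[i]; KeyError (missing key) excluded by Pre_

-- ===== PORT B =====
def game_limits_alt (dims : Int) (cubes : List (List Int × Int)) : List (Int × Int) :=
  let cols := cubes.foldl
    (fun cols cube =>
      (PySem.List.enumerate cube.1).foldl
        (fun cols p => cols.modify p.1 [] (fun l => l ++ [p.2])) cols)   -- cols.setdefault(i, []).append(d)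
    PySem.Dict.empty
  (PySem.List.pyRange 0 dims 1).map (fun i =>
    let col := (cols.get? i).getD []    -- cols[i]; KeyError (missing key) excluded by Pre_
    match PySem.List.min? col (fun x => x), PySem.List.max? col (fun x => x) with
    | some m, some M => (m - 1, M + 1)
    | _, _ => (0, 0))

-- ===== PRECONDITION & SPEC =====
-- Pre_ excludes exactly the inputs where Python A raises KeyError: dims > 0 while no cube has at least dims coordinates.
def Pre_game_limits (dims : Int) (cubes : List (List Int × Int)) : Prop :=
  dims ≤ 0 ∨ ∃ c ∈ cubes, dims ≤ (c.1.length : Int)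
instance (dims : Int) (cubes : List (List Int × Int)) : Decidable (Pre_game_limits dims cubes) := by unfold Pre_game_limits; infer_instance
def pvWitness_game_limits : Int × (List (List Int × Int)) := (2, [([1, 3], 5)])

def Spec_game_limits (dims : Int) (cubes : List (List Int × Int)) (out : List (Int × Int)) : Prop := out = game_limits_alt dims cubes
instance (dims : Int) (cubes : List (List Int × Int)) (out : List (Int × Int)) : Decidable (Spec_game_limits dims cubes out) := by unfold Spec_game_limits; infer_instance

-- ===== CLAIM (what is proved, stated in full; the proofs are below) =====
def Claim_equal_game_limits : Prop := ∀ (dims : Int) (cubes : List (List Int × Int)), Dom_game_limits dims cubes → Pre_game_limits dims cubes → Spec_game_limits dims cubes (game_limits dims cubes)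

-- ===== LEMMAS AND PROOFS =====

-- A nested fold over the enumerations is a fold over the flattened pair list.
theorem foldl_enum_flatMap {σ : Type} (g : σ → Int × Int → σ)
    (cubes : List (List Int × Int)) (st : σ) :
    cubes.foldl (fun st cube => (PySem.List.enumerate cube.1).foldl g st) st
      = (cubes.flatMap (fun c => PySem.List.enumerate c.1)).foldl g st := by
  induction cubes generalizing st with
  | nil => rfl
  | cons c t ih => simp [List.flatMap_cons, List.foldl_append, ih]

-- a componentwise pair fold splits into two folds
theorem foldl_pair_split {α β γ : Type} (f : α → γ → α) (g : β → γ → β)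
    (l : List γ) (a : α) (b : β) :
    l.foldl (fun st p => (f st.1 p, g st.2 p)) (a, b) = (l.foldl f a, l.foldl g b) := by
  induction l generalizing a b with
  | nil => rfl
  | cons x t ih => simp [List.foldl_cons, ih]

def glMinStep (d : PySem.Dict Int Int) (p : Int × Int) : PySem.Dict Int Int :=
  match d.get? p.1 with
  | none => d.insert p.1 (p.2 - 1)
  | some cm => if p.2 - 1 < cm then d.insert p.1 (p.2 - 1) else d

def glMaxStep (d : PySem.Dict Int Int) (p : Int × Int) : PySem.Dict Int Int :=
  match d.get? p.1 with
  | none => d.insert p.1 (p.2 + 1)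
  | some cM => if cM < p.2 + 1 then d.insert p.1 (p.2 + 1) else d

def glFMin (a : Option Int) (v : Int) : Option Int :=
  some (match a with | none => v - 1 | some m => if v - 1 < m then v - 1 else m)

def glFMax (a : Option Int) (v : Int) : Option Int :=
  some (match a with | none => v + 1 | some m => if m < v + 1 then v + 1 else m)

theorem minStep_get (l : List (Int × Int)) (d : PySem.Dict Int Int) (i : Int) :
    (l.foldl glMinStep d).get? i
      = (l.filter (fun p => p.1 == i)).foldl (fun a p => glFMin a p.2) (d.get? i) := by
  induction l generalizing d with
  | nil => rfl
  | cons p t ih =>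
    rw [List.foldl_cons, ih]
    by_cases h : p.1 = i
    · subst h
      have hstep : (glMinStep d p).get? p.1 = glFMin (d.get? p.1) p.2 := by
        unfold glMinStep glFMin
        cases hd : d.get? p.1 with
        | none => simp [PySem.Dict.get?_insert_self]
        | some cm =>
          dsimp only
          split_ifs with hlt <;> simp [PySem.Dict.get?_insert_self, hd]
      simp [hstep]
    · have hstep : (glMinStep d p).get? i = d.get? i := by
        unfold glMinStep
        cases hd : d.get? p.1 with
        | none => simp [PySem.Dict.get?_insert, Ne.symm h]
        | some cm =>
          dsimp only
          split_ifs with hlt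
          · simp [PySem.Dict.get?_insert, Ne.symm h]
          · rfl
      simp [hstep, h]

theorem maxStep_get (l : List (Int × Int)) (d : PySem.Dict Int Int) (i : Int) :
    (l.foldl glMaxStep d).get? i
      = (l.filter (fun p => p.1 == i)).foldl (fun a p => glFMax a p.2) (d.get? i) := by
  induction l generalizing d with
  | nil => rfl
  | cons p t ih =>
    rw [List.foldl_cons, ih]
    by_cases h : p.1 = i
    · subst h
      have hstep : (glMaxStep d p).get? p.1 = glFMax (d.get? p.1) p.2 := by
        unfold glMaxStep glFMax
        cases hd : d.get? p.1 with
        | none => simp [PySem.Dict.get?_insert_self]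
        | some cM =>
          dsimp only
          split_ifs with hlt <;> simp [PySem.Dict.get?_insert_self, hd]
      simp [hstep]
    · have hstep : (glMaxStep d p).get? i = d.get? i := by
        unfold glMaxStep
        cases hd : d.get? p.1 with
        | none => simp [PySem.Dict.get?_insert, Ne.symm h]
        | some cM =>
          dsimp only
          split_ifs with hlt
          · simp [PySem.Dict.get?_insert, Ne.symm h]
          · rfl
      simp [hstep, h]

theorem fmin_fold_some (t : List Int) (m : Int) :
    t.foldl glFMin (some m) = some (t.foldl (fun m v => if v - 1 < m then v - 1 else m) m) := by
  induction t generalizing m with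
  | nil => rfl
  | cons v t ih => simp [List.foldl_cons, glFMin, ih]

theorem fmax_fold_some (t : List Int) (m : Int) :
    t.foldl glFMax (some m) = some (t.foldl (fun m v => if m < v + 1 then v + 1 else m) m) := by
  induction t generalizing m with
  | nil => rfl
  | cons v t ih => simp [List.foldl_cons, glFMax, ih]

theorem fold_min_shift (t : List Int) (x : Int) :
    t.foldl (fun m v => if v - 1 < m then v - 1 else m) (x - 1) = t.foldl min x - 1 := by
  induction t generalizing x with
  | nil => rfl
  | cons v t ih =>
    simp only [List.foldl_cons]
    have h : (if v - 1 < x - 1 then v - 1 else x - 1) = min x v - 1 := by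
      rw [Int.min_def]; split_ifs <;> omega
    rw [h, ih]

theorem fold_max_shift (t : List Int) (x : Int) :
    t.foldl (fun m v => if m < v + 1 then v + 1 else m) (x + 1) = t.foldl max x + 1 := by
  induction t generalizing x with
  | nil => rfl
  | cons v t ih =>
    simp only [List.foldl_cons]
    have h : (if x + 1 < v + 1 then v + 1 else x + 1) = max x v + 1 := by
      rw [Int.max_def]; split_ifs <;> omega
    rw [h, ih]

theorem fmin_fold_char (cs : List Int) :
    cs.foldl glFMin none = (PySem.List.min? cs (fun x => x)).map (fun m => m - 1) := by
  cases cs with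
  | nil => rfl
  | cons x t =>
    rw [List.foldl_cons, PySem.List.min?_id_cons]
    show t.foldl glFMin (glFMin none x) = _
    rw [show glFMin none x = some (x - 1) from rfl, fmin_fold_some, fold_min_shift]
    rfl

theorem fmax_fold_char (cs : List Int) :
    cs.foldl glFMax none = (PySem.List.max? cs (fun x => x)).map (fun m => m + 1) := by
  cases cs with
  | nil => rfl
  | cons x t =>
    rw [List.foldl_cons, PySem.List.max?_id_cons]
    show t.foldl glFMax (glFMax none x) = _
    rw [show glFMax none x = some (x + 1) from rfl, fmax_fold_some, fold_max_shift]
    rfl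

-- ===== VERDICT (by name: the statement is the Claim_ definition above) =====
theorem game_limits_spec : Claim_equal_game_limits := by
  intro dims cubes _ _
  unfold Spec_game_limits game_limits game_limits_alt
  simp only []
  rw [foldl_enum_flatMap, foldl_enum_flatMap]
  set pairs := cubes.flatMap (fun c => PySem.List.enumerate c.1) with hp
  have hsplit : pairs.foldl glStepA (PySem.Dict.empty, PySem.Dict.empty)
      = (pairs.foldl glMinStep PySem.Dict.empty, pairs.foldl glMaxStep PySem.Dict.empty) := by
    have hfun : glStepA = fun st p => (glMinStep st.1 p, glMaxStep st.2 p) :=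
      funext fun st => funext fun p => rfl
    rw [hfun, foldl_pair_split]
  rw [hsplit]
  apply List.map_congr_left
  intro i _
  have hcol : ((pairs.foldl (fun cols p => cols.modify p.1 ([] : List Int) (fun l => l ++ [p.2])) PySem.Dict.empty).get? i).getD []
      = (pairs.filter (fun p => p.1 == i)).map (fun p => p.2) := by
    rw [← PySem.Dict.getD_eq_get?_getD, PySem.Dict.getD_foldl_modify_append]
    simp
  set cs := (pairs.filter (fun p => p.1 == i)).map (fun p => p.2) with hcs
  have hminfold : (pairs.filter (fun p => p.1 == i)).foldl (fun a p => glFMin a p.2) (none : Option Int)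
      = cs.foldl glFMin none := by rw [hcs, List.foldl_map]
  have hmaxfold : (pairs.filter (fun p => p.1 == i)).foldl (fun a p => glFMax a p.2) (none : Option Int)
      = cs.foldl glFMax none := by rw [hcs, List.foldl_map]
  have hmin : (pairs.foldl glMinStep PySem.Dict.empty).get? i
      = (PySem.List.min? cs (fun x => x)).map (fun m => m - 1) := by
    rw [minStep_get, PySem.Dict.get?_empty, hminfold, fmin_fold_char]
  have hmax : (pairs.foldl glMaxStep PySem.Dict.empty).get? i
      = (PySem.List.max? cs (fun x => x)).map (fun m => m + 1) := by
    rw [maxStep_get, PySem.Dict.get?_empty, hmaxfold, fmax_fold_char]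
  rw [hmin, hmax, hcol]
  cases hm : PySem.List.min? cs (fun x => x) with
  | none =>
    have hnil : cs = [] := (PySem.List.min?_eq_none_iff _ _).mp hm
    rw [hnil]
    rfl
  | some m =>
    cases hM : PySem.List.max? cs (fun x => x) with
    | none =>
      have hnil : cs = [] := (PySem.List.max?_eq_none_iff _ _).mp hM
      rw [hnil] at hm
      simp [PySem.List.min?] at hm
    | some M => simp
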